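-- pv_equiv track=rewrite | github.com/shunita/Cherry-picked-Generalizations-Claim-Endorse | SE.py | f_so_statment1
-- ===== SOURCE A (Python) =====
-- def f_so_statment1(groups, Currentgroups):
--     """
--     @param groups: query result, like a dictionary from group to a numeric value
--     @param Currentgroups: the identifiers(a list of strings) of the groups
--     """
--     for g in Currentgroups:
--         if not g in groups:
--             return False
--     current = True
--     for i in range(len(Currentgroups) - 1):
--         if (groups[Currentgroups[i]] < groups[Currentgroups[i + 1]]):
--             current = False
--     return current
-- ===== SOURCE B (Python) =====
-- def f_so_statment1(groups, Currentgroups):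
--     if any(g not in groups for g in Currentgroups):
--         return False
--     values = [groups[g] for g in Currentgroups]
--     return values == sorted(values, reverse=True)
-- ===== Notes on version B (the rewrite author's own statement) =====
-- stated objective: idiomatic
-- what changed: Replaces the flag-carrying adjacent-pair index loop with a membership guard plus a sort-and-compare (values == sorted(values, reverse=True)) over the extracted value list.
import Mathlib
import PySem

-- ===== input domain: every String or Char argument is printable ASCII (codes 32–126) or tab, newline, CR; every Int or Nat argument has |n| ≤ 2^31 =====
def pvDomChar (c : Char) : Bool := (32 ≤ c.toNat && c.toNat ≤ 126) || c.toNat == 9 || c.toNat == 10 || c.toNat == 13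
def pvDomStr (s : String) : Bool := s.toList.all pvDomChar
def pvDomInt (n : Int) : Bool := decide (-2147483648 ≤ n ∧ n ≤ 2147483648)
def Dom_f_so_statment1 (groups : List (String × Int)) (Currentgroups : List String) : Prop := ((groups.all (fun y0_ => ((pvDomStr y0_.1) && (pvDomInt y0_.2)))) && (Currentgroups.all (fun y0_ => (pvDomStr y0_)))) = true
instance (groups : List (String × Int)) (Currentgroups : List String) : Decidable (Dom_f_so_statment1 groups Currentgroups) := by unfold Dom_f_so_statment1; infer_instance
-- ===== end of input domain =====

-- B replaces A's flag-carrying adjacent-pair index loop by a membership guard plus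
-- sort-and-compare on the extracted value list (idiomatic; not faster).

-- ===== PORT A =====
-- dict lookup groups[g] (first match in the association list); groups[g] with a missing
-- key cannot be reached in A (the first loop returned False), so the 0 default is inert
def pvLookD (groups : List (String × Int)) (g : String) : Int :=
  ((groups.lookup g).getD 0)

def f_so_statment1 (groups : List (String × Int)) (Currentgroups : List String) : Bool :=
  -- first loop: 'for g in Currentgroups: if not g in groups: return False'
  if Currentgroups.all (fun g => groups.any (fun p => p.1 == g)) then
    -- 'current = True; for i in range(len(Currentgroups)-1): if groups[Cg[i]] < groups[Cg[i+1]]: current = False; return current'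
    (PySem.List.pyRange 0 (PySem.List.len Currentgroups - 1) 1).foldl
      (fun current i =>
        if pvLookD groups (PySem.List.pyGetD Currentgroups i "") <
           pvLookD groups (PySem.List.pyGetD Currentgroups (i + 1) "") then false else current)
      true
  else false

-- ===== PORT B =====
def f_so_statment1_alt (groups : List (String × Int)) (Currentgroups : List String) : Bool :=
  if Currentgroups.any (fun g => (groups.lookup g).isNone) then false
  else
    let values := Currentgroups.map (fun g => (groups.lookup g).getD 0)
    values == PySem.List.sorted values (fun x => x) true

-- ===== PRECONDITION & SPEC =====
def Spec_f_so_statment1 (groups : List (String × Int)) (Currentgroups : List String) (out : Bool) : Prop := out = f_so_statment1_alt groups Currentgroups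
instance (groups : List (String × Int)) (Currentgroups : List String) (out : Bool) : Decidable (Spec_f_so_statment1 groups Currentgroups out) := by unfold Spec_f_so_statment1; infer_instance

-- ===== CLAIM (what is proved, stated in full; the proofs are below) =====
def Claim_equal_f_so_statment1 : Prop := ∀ (groups : List (String × Int)) (Currentgroups : List String), Dom_f_so_statment1 groups Currentgroups → Spec_f_so_statment1 groups Currentgroups (f_so_statment1 groups Currentgroups)

-- ===== LEMMAS AND PROOFS =====


theorem pv_mem_any (groups : List (String × Int)) (g : String) :
    groups.any (fun p => p.1 == g) = (groups.lookup g).isSome := by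
  induction groups with
  | nil => rfl
  | cons p t ih =>
    simp only [List.any_cons]
    by_cases h : p.1 = g
    · subst h; simp [List.lookup]
    · have h1 : (p.1 == g) = false := beq_eq_false_iff_ne.mpr h
      have h2 : (g == p.1) = false := beq_eq_false_iff_ne.mpr (Ne.symm h)
      simp [List.lookup, h1, h2, ih]

theorem pv_guard (groups : List (String × Int)) (Cg : List String) :
    (Cg.any fun g => (groups.lookup g).isNone) = !(Cg.all fun g => groups.any (fun p => p.1 == g)) := by
  induction Cg with
  | nil => rfl
  | cons x t ih =>
    simp only [List.any_cons, List.all_cons, ih, pv_mem_any, Bool.not_and]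
    cases List.lookup x groups <;> simp

theorem pv_foldl_flag (l : List Int) (P : Int → Prop) [DecidablePred P] (b : Bool) :
    l.foldl (fun c i => if P i then false else c) b = (b && l.all (fun i => !decide (P i))) := by
  induction l generalizing b with
  | nil => simp
  | cons x t ih =>
    simp only [List.foldl_cons, List.all_cons, ih]
    by_cases h : P x
    · simp [h]
    · simp [h]

theorem pv_main (groups : List (String × Int)) (Cg : List String) :
    f_so_statment1 groups Cg = f_so_statment1_alt groups Cg := by
  unfold f_so_statment1 f_so_statment1_alt
  rw [pv_guard]
  cases hall : (Cg.all fun g => groups.any (fun p => p.1 == g)) with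
  | false => simp
  | true =>
    simp only [Bool.not_true, if_true, if_false, Bool.false_eq_true]
    rw [pv_foldl_flag, Bool.true_and]
    set f : String → Int := fun g => (groups.lookup g).getD 0 with hf
    rw [Bool.eq_iff_iff]
    rw [List.all_eq_true, beq_iff_eq]
    have hmap : (Cg.map f).length = Cg.length := List.length_map ..
    constructor
    · intro h
      refine (PySem.List.sorted_rev_eq_self_of_pairwise _ _ ?_).symm
      rw [← List.isChain_iff_pairwise]
      apply List.isChain_iff_getElem.mpr
      intro k hk
      have hk' : k + 1 < Cg.length := by omega
      have := h (k : Int) (PySem.List.mem_pyRange_one.mpr ⟨by omega, by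
        simp [PySem.List.len]; omega⟩)
      rw [PySem.List.pyGetD_of_nonneg Cg "" (by omega),
          PySem.List.pyGetD_of_nonneg Cg "" (by omega)] at this
      have ht : ((k : Int) + 1).toNat = k + 1 := by omega
      have ht0 : ((k : Int)).toNat = k := by omega
      rw [ht, ht0] at this
      rw [List.getD_eq_getElem Cg "" (by omega), List.getD_eq_getElem Cg "" (by omega)] at this
      simp only [Bool.not_eq_eq_eq_not, Bool.not_true, decide_eq_false_iff_not, not_lt] at this
      simp only [List.getElem_map]
      exact this
    · intro h i hi
      have hi' := PySem.List.mem_pyRange_one.mp hi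
      have hlen : (i : Int) < (Cg.length : Int) - 1 := by
        have := hi'.2; simpa [PySem.List.len] using this
      have hpw : List.Pairwise (fun a b : Int => b ≤ a) (Cg.map f) := by
        have := PySem.List.sorted_pairwise_rev (Cg.map f) (fun x : Int => x)
        rw [← h] at this; exact this
      have hch := List.isChain_iff_getElem.mp ((List.isChain_iff_pairwise).mpr hpw)
      have hk : i.toNat + 1 < (Cg.map f).length := by
        simp only [List.length_map]; omega
      have hv := hch i.toNat hk
      simp only [List.getElem_map] at hv
      rw [PySem.List.pyGetD_of_nonneg Cg "" hi'.1, PySem.List.pyGetD_of_nonneg Cg "" (by omega)]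
      have ht : (i + 1).toNat = i.toNat + 1 := by omega
      rw [ht]
      rw [List.getD_eq_getElem Cg "" (by omega), List.getD_eq_getElem Cg "" (by omega)]
      simp only [Bool.not_eq_eq_eq_not, Bool.not_true, decide_eq_false_iff_not, not_lt]
      exact hv

-- ===== VERDICT (by name: the statement is the Claim_ definition above) =====
theorem f_so_statment1_spec : Claim_equal_f_so_statment1 := by
  intro groups Currentgroups _
  unfold Spec_f_so_statment1
  exact pv_main groups Currentgroups
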